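-- pv_equiv track=rewrite | github.com/YuKyung-Chung/Algorithm | 프로그래머스/1/118666. 성격 유형 검사하기/성격 유형 검사하기.py | solution
-- ===== SOURCE A (Python) =====
-- def solution(survey, choices):
--     answer = ''
--     scores = {
--         'R' : 0,
--         'T' : 0,
--         'C' : 0,
--         'F' : 0,
--         'J' : 0,
--         'M' : 0,
--         'A' : 0,
--         'N' : 0
--     }
--
--     for i in range(len(survey)):
--         first, second = survey[i][0], survey[i][1]
--
--         if choices[i] < 4:
--             scores[first] += 4 - choices[i]
--         elif choices[i] > 4:
--             scores[second] += choices[i] - 4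
--
--     # 성격 유형 선택(알파벳 오름차순으로)
--     pairs = [('R','T'),('C','F'),('J','M'),('A','N')]
--
--     for a,b in pairs:
--         if scores[a] >= scores[b]:
--             answer += a
--         else:
--             answer += b
--
--     return answer
-- ===== SOURCE B (Python) =====
-- def solution(survey, choices):
--     qs = list(zip(survey, choices))
--
--     def pts(letter):
--         return sum(4 - c for q, c in qs if c < 4 and q[0] == letter) \
--              + sum(c - 4 for q, c in qs if c > 4 and q[1] == letter)
--
--     return ''.join(a if pts(a) >= pts(b) else b
--                    for a, b in [('R', 'T'), ('C', 'F'), ('J', 'M'), ('A', 'N')])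
-- ===== Notes on version B (the rewrite author's own statement) =====
-- stated objective: simpler
-- what changed: B is pair-major instead of question-major: no mutable eight-counter dict and no indexed single pass; for each of the four pairs it recomputes each letter's points directly as comprehension sums over the zipped survey, then joins the winning letters.
import Mathlib
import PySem

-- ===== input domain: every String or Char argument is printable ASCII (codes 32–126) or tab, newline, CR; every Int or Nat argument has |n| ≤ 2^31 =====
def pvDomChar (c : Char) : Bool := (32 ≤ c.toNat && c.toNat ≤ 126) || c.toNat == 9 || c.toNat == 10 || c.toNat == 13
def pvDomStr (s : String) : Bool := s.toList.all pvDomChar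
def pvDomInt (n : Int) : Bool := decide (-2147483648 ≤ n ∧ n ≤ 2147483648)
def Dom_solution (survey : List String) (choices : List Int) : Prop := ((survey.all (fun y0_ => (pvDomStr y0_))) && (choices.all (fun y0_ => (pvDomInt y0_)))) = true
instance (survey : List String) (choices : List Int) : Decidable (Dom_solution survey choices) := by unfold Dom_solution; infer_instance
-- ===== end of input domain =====

-- B is pair-major: for each of the four pairs it recomputes each letter's points as
-- comprehension sums over the zipped survey (no mutable eight-counter dict, no index loop).


-- ===== PORT A =====
-- initial scores dict (the eight literal inserts of A)
def scoresInit : PySem.Dict Char Int :=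
  ((((((((PySem.Dict.empty.insert 'R' 0).insert 'T' 0).insert 'C' 0).insert 'F' 0).insert
    'J' 0).insert 'M' 0).insert 'A' 0).insert 'N' 0)

-- loop body of A: survey[i][0]/[1] and the dict keys are in range on Pre_, so pyGetD/getD are exact there
def stepA (d : PySem.Dict Char Int) (s : String) (c : Int) : PySem.Dict Char Int :=
  let first := PySem.List.pyGetD s.toList 0 ' '
  let second := PySem.List.pyGetD s.toList 1 ' '
  if c < 4 then d.insert first (d.getD first 0 + (4 - c))
  else if c > 4 then d.insert second (d.getD second 0 + (c - 4))
  else d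

def pairsA : List (Char × Char) := [('R', 'T'), ('C', 'F'), ('J', 'M'), ('A', 'N')]

def solution (survey : List String) (choices : List Int) : String :=
  let scores := (PySem.List.pyRange 0 survey.length 1).foldl
    (fun d i => stepA d (PySem.List.pyGetD survey i "") (PySem.List.pyGetD choices i 0)) scoresInit
  String.ofList (pairsA.foldl
    (fun ans p => if scores.getD p.1 0 ≥ scores.getD p.2 0 then ans ++ [p.1] else ans ++ [p.2]) [])

-- ===== PORT B =====
-- pts(letter): the two comprehension sums of Source B (q[0]/q[1] via pyGetD, exact on Pre_)
def ptsB (qs : List (String × Int)) (letter : Char) : Int :=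
  ((qs.filter (fun qc => qc.2 < 4 && (PySem.List.pyGetD qc.1.toList 0 ' ' == letter))).map
      (fun qc => 4 - qc.2)).sum
  + ((qs.filter (fun qc => qc.2 > 4 && (PySem.List.pyGetD qc.1.toList 1 ' ' == letter))).map
      (fun qc => qc.2 - 4)).sum

def pairsB : List (Char × Char) := [('R', 'T'), ('C', 'F'), ('J', 'M'), ('A', 'N')]

def solution_alt (survey : List String) (choices : List Int) : String :=
  let qs := survey.zip choices
  String.ofList (pairsB.map (fun p => if ptsB qs p.1 ≥ ptsB qs p.2 then p.1 else p.2))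

-- ===== PRECONDITION & SPEC =====
def keyset : List Char := ['R', 'T', 'C', 'F', 'J', 'M', 'A', 'N']

-- Pre_ excludes exactly the inputs where Python A raises: choices shorter than survey or a
-- surveyed string shorter than 2 (IndexError), or a scored letter outside the eight keys (KeyError).
def Pre_solution (survey : List String) (choices : List Int) : Prop :=
  survey.length ≤ choices.length ∧
  ∀ i, i < survey.length →
    2 ≤ (survey.getD i "").toList.length ∧
    (choices.getD i 0 < 4 → (survey.getD i "").toList.getD 0 ' ' ∈ keyset) ∧
    (choices.getD i 0 > 4 → (survey.getD i "").toList.getD 1 ' ' ∈ keyset)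
instance (survey : List String) (choices : List Int) : Decidable (Pre_solution survey choices) := by unfold Pre_solution; infer_instance

def pvWitness_solution : List String × List Int := (["RT", "CF", "JM", "AN"], [1, 7, 4, 2])

def Spec_solution (survey : List String) (choices : List Int) (out : String) : Prop := out = solution_alt survey choices
instance (survey : List String) (choices : List Int) (out : String) : Decidable (Spec_solution survey choices out) := by unfold Spec_solution; infer_instance

-- ===== CLAIM (what is proved, stated in full; the proofs are below) =====
def Claim_equal_solution : Prop := ∀ (survey : List String) (choices : List Int), Dom_solution survey choices → Pre_solution survey choices → Spec_solution survey choices (solution survey choices)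

-- ===== LEMMAS AND PROOFS =====

-- the points one question (s, c) contributes to letter x
def contrib (s : String) (c : Int) (x : Char) : Int :=
  (if c < 4 ∧ PySem.List.pyGetD s.toList 0 ' ' = x then 4 - c else 0)
  + (if c > 4 ∧ PySem.List.pyGetD s.toList 1 ' ' = x then c - 4 else 0)

lemma ptsB_eq_sum_contrib (qs : List (String × Int)) (x : Char) :
    ptsB qs x = (qs.map (fun qc => contrib qc.1 qc.2 x)).sum := by
  induction qs with
  | nil => rfl
  | cons q qs ih =>
    simp only [ptsB, contrib, List.filter_cons, List.map_cons, List.sum_cons] at *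
    split_ifs <;> simp_all <;> omega

lemma getD_stepA (d : PySem.Dict Char Int) (s : String) (c : Int) (x : Char) :
    (stepA d s c).getD x 0 = d.getD x 0 + contrib s c x := by
  unfold stepA contrib
  by_cases hlt : c < 4
  · have hgt : ¬ (4 < c) := by omega
    rw [if_pos hlt, PySem.Dict.getD_insert]
    by_cases hx : x = PySem.List.pyGetD s.toList 0 ' '
    · subst hx; simp [hlt, hgt]
    · have hx' : ¬ (PySem.List.pyGetD s.toList 0 ' ' = x) := fun h => hx h.symm
      simp [hx, hx', hgt]
  · by_cases hgt : c > 4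
    · rw [if_neg hlt, if_pos hgt, PySem.Dict.getD_insert]
      by_cases hx : x = PySem.List.pyGetD s.toList 1 ' '
      · subst hx; simp [hlt, hgt]
      · have hx' : ¬ (PySem.List.pyGetD s.toList 1 ' ' = x) := fun h => hx h.symm
        simp [hx, hx', hlt]
    · rw [if_neg hlt, if_neg hgt]
      simp [hlt, hgt]

lemma getD_foldl_stepA (qs : List (String × Int)) (d : PySem.Dict Char Int) (x : Char) :
    (qs.foldl (fun d sc => stepA d sc.1 sc.2) d).getD x 0
      = d.getD x 0 + (qs.map (fun qc => contrib qc.1 qc.2 x)).sum := by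
  induction qs generalizing d with
  | nil => simp
  | cons q qs ih => simp [List.foldl_cons, ih, getD_stepA]; ring

lemma foldl_range_eq_zip (survey : List String) (choices : List Int)
    (h : survey.length ≤ choices.length) (d : PySem.Dict Char Int) :
    (PySem.List.pyRange 0 survey.length 1).foldl
      (fun d i => stepA d (PySem.List.pyGetD survey i "") (PySem.List.pyGetD choices i 0)) d
    = (survey.zip choices).foldl (fun d sc => stepA d sc.1 sc.2) d := by
  rw [show ((survey.length : Int)) = ((survey.length : Nat) : Int) from rfl]
  rw [PySem.List.pyRange_zero_natCast, List.foldl_map]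
  simp only [PySem.List.pyGetD_natCast]
  induction survey generalizing choices d with
  | nil => simp
  | cons s ss ih =>
    match choices, h with
    | c :: cs, h =>
      simp only [List.length_cons]
      rw [List.range_succ_eq_map, List.foldl_cons, List.foldl_map]
      simp only [List.getD_cons_zero, List.getD_cons_succ, List.zip_cons_cons, List.foldl_cons]
      exact ih cs (by simpa using h) _

lemma getD_scores (survey : List String) (choices : List Int)
    (h : survey.length ≤ choices.length) (x : Char) (hx : x ∈ keyset) :
    ((PySem.List.pyRange 0 survey.length 1).foldl
      (fun d i => stepA d (PySem.List.pyGetD survey i "") (PySem.List.pyGetD choices i 0))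
      scoresInit).getD x 0 = ptsB (survey.zip choices) x := by
  rw [foldl_range_eq_zip survey choices h, getD_foldl_stepA, ptsB_eq_sum_contrib]
  have h0 : scoresInit.getD x 0 = 0 := by
    fin_cases hx <;> decide
  rw [h0]; ring

-- ===== VERDICT (by name: the statement is the Claim_ definition above) =====
theorem solution_spec : Claim_equal_solution := by
  intro survey choices _ hpre
  unfold Spec_solution solution solution_alt
  simp only [pairsA, pairsB, List.foldl_cons, List.foldl_nil, List.map_cons, List.map_nil,
    List.nil_append]
  rw [getD_scores survey choices hpre.1 'R' (by decide),
      getD_scores survey choices hpre.1 'T' (by decide),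
      getD_scores survey choices hpre.1 'C' (by decide),
      getD_scores survey choices hpre.1 'F' (by decide),
      getD_scores survey choices hpre.1 'J' (by decide),
      getD_scores survey choices hpre.1 'M' (by decide),
      getD_scores survey choices hpre.1 'A' (by decide),
      getD_scores survey choices hpre.1 'N' (by decide)]
  split_ifs <;> rfl
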